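-- pv_equiv track=rewrite | github.com/sierra98x/resources | CoNLL-2022-An-Alignment-Based-Approach-To-Text-Segmentation-Similarity-Scoring/helpers.py | massToStr
-- ===== SOURCE A (Python) =====
-- from typing import Tuple, List
--
-- def massToStr(massList: List[int]):
--
--     chars = ['A','B','C','D','E','F','G','H','I','J','K','L','M','N','O','P','Q','R','S','T','U','V','W','X','Y','Z']
--
--     lastChar = len(chars)-1
--     charIndex = 0
--
--     sectionStrings = []
--     for segSize in massList:
--
--         section = []
--
--         for _ in range(segSize):
--
--             nextChar = chars[charIndex]
--             section.append(nextChar)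
--
--             charIndex = 0 if charIndex == lastChar else charIndex+1
--
--         sectionStrings.append('.'.join(section))
--
--     return '|'.join(sectionStrings)
-- ===== SOURCE B (Python) =====
-- def massToStr(massList):
--     chars = 'ABCDEFGHIJKLMNOPQRSTUVWXYZ'
--     sizes = [max(s, 0) for s in massList]
--     total = sum(sizes)
--     # one continuous cyclic character stream long enough for everything
--     stream = (chars * (total // 26 + 1))[:total]
--     sections = []
--     pos = 0
--     for n in sizes:
--         sections.append('.'.join(stream[pos:pos + n]))
--         pos += n
--     return '|'.join(sections)
-- ===== Notes on version B (the rewrite author's own statement) =====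
-- stated objective: alternative
-- what changed: Instead of stepping a wrap-around character index per emitted letter, B precomputes the whole cyclic character stream once by string repetition and then cuts each section out of it as a contiguous slice with a running offset.
import Mathlib
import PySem

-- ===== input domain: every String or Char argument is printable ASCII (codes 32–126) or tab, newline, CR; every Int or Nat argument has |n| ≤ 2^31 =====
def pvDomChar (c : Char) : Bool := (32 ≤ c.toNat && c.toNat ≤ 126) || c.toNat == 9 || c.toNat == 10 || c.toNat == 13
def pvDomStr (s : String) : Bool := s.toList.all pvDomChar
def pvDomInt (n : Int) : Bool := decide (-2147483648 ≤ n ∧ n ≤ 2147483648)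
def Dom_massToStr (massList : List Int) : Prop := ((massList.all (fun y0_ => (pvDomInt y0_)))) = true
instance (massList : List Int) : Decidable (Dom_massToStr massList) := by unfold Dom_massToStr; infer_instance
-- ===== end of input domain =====

-- B builds the whole cyclic character stream once by repetition and cuts each
-- section out of it as a contiguous slice (objective: alternative decomposition).

-- ===== PORT A =====
def mtsChars : List Char :=
  ['A','B','C','D','E','F','G','H','I','J','K','L','M',
   'N','O','P','Q','R','S','T','U','V','W','X','Y','Z']

-- inner loop: `for _ in range(segSize)` over state (section, charIndex)
def mtsInner : Nat → List Char → Nat → List Char × Nat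
  | 0, sect, charIndex => (sect, charIndex)
  | Nat.succ k, sect, charIndex =>
      mtsInner k (sect ++ [mtsChars.getD charIndex 'A'])
        (if charIndex == mtsChars.length - 1 then 0 else charIndex + 1)

def massToStr (massList : List Int) : String :=
  let r := massList.foldl
    (fun (st : List String × Nat) segSize =>
      let p := mtsInner segSize.toNat [] st.2
      (st.1 ++ [String.intercalate "." (p.1.map (fun c => String.mk [c]))], p.2))
    ([], 0)
  String.intercalate "|" r.1

-- ===== PORT B =====
def mtsCharsB : List Char :=
  "ABCDEFGHIJKLMNOPQRSTUVWXYZ".toList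

-- `chars * k` then `[:total]`
def mtsStream (total : Nat) : List Char :=
  ((List.replicate (total / 26 + 1) mtsCharsB).flatten).take total

def massToStr_alt (massList : List Int) : String :=
  let sizes := massList.map (fun s => (max s 0).toNat)
  let total := sizes.sum
  let stream := mtsStream total
  let r := sizes.foldl
    (fun (st : List String × Nat) n =>
      (st.1 ++ [String.intercalate "."
                 (((stream.drop st.2).take n).map (fun c => String.mk [c]))],
       st.2 + n))
    ([], 0)
  String.intercalate "|" r.1

-- ===== PRECONDITION & SPEC =====
def Spec_massToStr (massList : List Int) (out : String) : Prop := out = massToStr_alt massList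
instance (massList : List Int) (out : String) : Decidable (Spec_massToStr massList out) := by unfold Spec_massToStr; infer_instance

-- ===== CLAIM (what is proved, stated in full; the proofs are below) =====
def Claim_equal_massToStr : Prop := ∀ (massList : List Int), Dom_massToStr massList → Spec_massToStr massList (massToStr massList)

-- ===== LEMMAS AND PROOFS =====

theorem mtsChars_eq : mtsCharsB = mtsChars := by decide

-- A's step-and-reset inner loop in closed modular form
theorem mtsInner_closed (n : Nat) (sect : List Char) (ci : Nat) (hci : ci < 26) :
    mtsInner n sect ci =
      (sect ++ (List.range n).map (fun i => mtsChars.getD ((ci + i) % 26) 'A'),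
       (ci + n) % 26) := by
  induction n generalizing sect ci with
  | zero => simp [mtsInner, Nat.mod_eq_of_lt hci]
  | succ k ih =>
      have hstep : (if ci == mtsChars.length - 1 then 0 else ci + 1) = (ci + 1) % 26 := by
        have hl : mtsChars.length = 26 := by decide
        rw [hl]
        by_cases hc : ci = 25
        · subst hc; decide
        · have hb : (ci == 25) = false := by simp [hc]
          rw [hb, if_neg (by simp), Nat.mod_eq_of_lt (by omega)]
      rw [mtsInner, hstep, ih _ _ (Nat.mod_lt _ (by norm_num))]
      simp only [Prod.mk.injEq]
      refine ⟨?_, by omega⟩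
      rw [List.append_assoc]
      congr 1
      rw [List.range_succ_eq_map, List.map_cons, List.map_map, List.singleton_append]
      refine List.cons_eq_cons.mpr ⟨?_, ?_⟩
      · congr 1; omega
      · refine List.map_congr_left fun i _ => ?_
        simp only [Function.comp_apply]
        congr 1
        omega

-- reading the concatenation of k copies of the alphabet at j is reading it at j % 26
theorem mts_flat_getD (k : Nat) : ∀ j : Nat, j < 26 * k →
    ((List.replicate k mtsCharsB).flatten).getD j 'A' = mtsChars.getD (j % 26) 'A' := by
  induction k with
  | zero => intro j hj; omega
  | succ k ih =>
      intro j hj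
      rw [List.replicate_succ, List.flatten_cons]
      by_cases hlt : j < 26
      · rw [List.getD_append _ _ _ _ (by rw [show mtsCharsB.length = 26 from by decide]; exact hlt),
            Nat.mod_eq_of_lt hlt, mtsChars_eq]
      · have h26 : mtsCharsB.length = 26 := by decide
        rw [List.getD_append_right _ _ _ _ (by omega), h26]
        rw [ih (j - 26) (by omega)]
        congr 1
        omega

-- the repeated-alphabet stream, element by element
theorem mtsStream_eq (total : Nat) :
    mtsStream total = (List.range total).map (fun j => mtsChars.getD (j % 26) 'A') := by
  have h26 : mtsCharsB.length = 26 := by decide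
  have hlen : ((List.replicate (total / 26 + 1) mtsCharsB).flatten).length
      = 26 * (total / 26 + 1) := by
    simp [List.length_flatten, List.map_replicate, List.sum_replicate, smul_eq_mul, h26]
    ring
  apply List.ext_getElem
  · simp [mtsStream, hlen]; omega
  · intro j h1 h2
    simp only [mtsStream, List.getElem_take, List.getElem_map, List.getElem_range]
    have hj : j < ((List.replicate (total / 26 + 1) mtsCharsB).flatten).length := by
      rw [hlen]; simp [mtsStream, hlen] at h1; omega
    rw [← List.getD_eq_getElem _ 'A' hj]
    exact mts_flat_getD _ j (by omega)

-- a slice of the stream is the modular-form section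
theorem mtsStream_slice (total pos n : Nat) (h : pos + n ≤ total) :
    ((mtsStream total).drop pos).take n
      = (List.range n).map (fun i => mtsChars.getD ((pos + i) % 26) 'A') := by
  rw [mtsStream_eq]
  apply List.ext_getElem
  · simp; omega
  · intro i h1 h2
    simp [List.getElem_take, List.getElem_drop, List.getElem_map, List.getElem_range]

-- fold equality with invariant: A's char index = B's offset mod 26
theorem mts_fold_eq (l : List Nat) (total : Nat) (acc : List String) (pos : Nat)
    (h : pos + l.sum ≤ total) :
    (l.foldl
      (fun (st : List String × Nat) n =>
        let p := mtsInner n [] st.2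
        (st.1 ++ [String.intercalate "." (p.1.map (fun c => String.mk [c]))], p.2))
      (acc, pos % 26)).1
    = (l.foldl
      (fun (st : List String × Nat) n =>
        (st.1 ++ [String.intercalate "."
                   ((((mtsStream total).drop st.2).take n).map (fun c => String.mk [c]))],
         st.2 + n))
      (acc, pos)).1 := by
  induction l generalizing acc pos with
  | nil => rfl
  | cons n rest ih =>
      simp only [List.foldl_cons, List.sum_cons] at h ⊢
      rw [mtsInner_closed _ _ _ (Nat.mod_lt _ (by norm_num)),
          mtsStream_slice total pos n (by omega)]
      simp only [List.nil_append]
      have hmod : ∀ i : Nat, (pos % 26 + i) % 26 = (pos + i) % 26 := fun i => Nat.mod_add_mod ..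
      simp only [hmod]
      exact ih _ (pos + n) (by omega)

theorem toNat_max (s : Int) : s.toNat = (max s 0).toNat := by omega

-- ===== VERDICT (by name: the statement is the Claim_ definition above) =====
theorem massToStr_spec : Claim_equal_massToStr := by
  intro massList _
  unfold Spec_massToStr massToStr massToStr_alt
  have hfold :
      massList.foldl
        (fun (st : List String × Nat) segSize =>
          let p := mtsInner segSize.toNat [] st.2
          (st.1 ++ [String.intercalate "." (p.1.map (fun c => String.mk [c]))], p.2))
        ([], 0)
      = (massList.map (fun s => (max s 0).toNat)).foldl
        (fun (st : List String × Nat) n =>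
          let p := mtsInner n [] st.2
          (st.1 ++ [String.intercalate "." (p.1.map (fun c => String.mk [c]))], p.2))
        ([], 0) := by
    rw [List.foldl_map]
    congr 1
    funext st s
    rw [toNat_max]
  simp only [hfold]
  have := mts_fold_eq (massList.map (fun s => (max s 0).toNat))
            ((massList.map (fun s => (max s 0).toNat)).sum) [] 0 (by omega)
  simp only [Nat.zero_mod] at this
  rw [this]
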